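-- pv_equiv track=rewrite | github.com/aws-samples/sample-data-replication-with-aws-glue | src/glue_job/storage/manual_bookmark_config.py | _select_best_timestamp_column
-- ===== SOURCE A (Python) =====
-- from typing import Dict, Optional, Tuple, Any, List
--
-- def _select_best_timestamp_column(timestamp_columns: List[str]) -> str:
--     """
--     Select the best timestamp column from candidates.
--
--     Args:
--         timestamp_columns: List of timestamp column candidates
--
--     Returns:
--         Best timestamp column name
--     """
--     if not timestamp_columns:
--         return timestamp_columns[0] if timestamp_columns else None
--
--     # Preference order for timestamp columns
--     preferred_patterns = [
--         'updated_at', 'last_updated', 'modified_at', 'last_modified',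
--         'update_date', 'modified_date', 'last_change', 'change_date'
--     ]
--
--     # Look for preferred patterns first
--     for pattern in preferred_patterns:
--         for column in timestamp_columns:
--             if pattern in column:
--                 return column
--
--     # If no preferred pattern found, return the first one
--     return timestamp_columns[0]
-- ===== SOURCE B (Python) =====
-- from typing import List
--
--
-- def _select_best_timestamp_column(timestamp_columns: List[str]) -> str:
--     """Single pass: score each column by the index of the first preferred
--     pattern it contains, keep the column with the smallest score."""
--     if not timestamp_columns:
--         return None
--
--     preferred_patterns = [
--         'updated_at', 'last_updated', 'modified_at', 'last_modified',
--         'update_date', 'modified_date', 'last_change', 'change_date'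
--     ]
--
--     best_col = None
--     best_prio = None
--     for column in timestamp_columns:
--         prio = None
--         for i, pattern in enumerate(preferred_patterns):
--             if pattern in column:
--                 prio = i
--                 break
--         if prio is not None and (best_prio is None or prio < best_prio):
--             best_prio = prio
--             best_col = column
--     return best_col if best_col is not None else timestamp_columns[0]
-- ===== Notes on version B (the rewrite author's own statement) =====
-- stated objective: alternative
-- what changed: Replaced the pattern-major nested scan (rescanning the column list once per pattern) with a single left-to-right pass over the columns that scores each column by the index of the first pattern it contains and keeps the column with the strictly smallest score.
import Mathlib
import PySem

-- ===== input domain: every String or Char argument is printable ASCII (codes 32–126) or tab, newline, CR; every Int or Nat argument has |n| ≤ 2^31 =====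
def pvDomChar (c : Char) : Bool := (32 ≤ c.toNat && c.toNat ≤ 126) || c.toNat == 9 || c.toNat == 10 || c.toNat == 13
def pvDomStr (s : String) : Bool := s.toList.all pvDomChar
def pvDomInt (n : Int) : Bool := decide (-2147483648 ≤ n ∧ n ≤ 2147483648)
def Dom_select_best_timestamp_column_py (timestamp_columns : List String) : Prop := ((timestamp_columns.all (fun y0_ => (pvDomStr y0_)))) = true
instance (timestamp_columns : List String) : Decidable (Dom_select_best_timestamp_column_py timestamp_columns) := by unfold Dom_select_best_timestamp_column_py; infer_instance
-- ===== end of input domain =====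

-- ===== PORT A =====
-- B replaces A's pattern-major nested scan with one column-major pass tracking
-- the best (smallest) pattern index per column; return values are identical.

def pvPats : List String :=
  ["updated_at", "last_updated", "modified_at", "last_modified",
   "update_date", "modified_date", "last_change", "change_date"]

-- inner loop of A: first column containing the pattern
def pvAInner (p : String) : List String → Option String
  | [] => none
  | c :: cs => if PySem.Str.isIn p c then some c else pvAInner p cs

-- outer loop of A over the patterns
def pvAOuter : List String → List String → Option String
  | [], _ => none
  | p :: ps, cols =>
    match pvAInner p cols with
    | some c => some c
    | none => pvAOuter ps cols

def select_best_timestamp_column_py (timestamp_columns : List String) : Option String :=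
  if timestamp_columns = [] then
    none
  else
    match pvAOuter pvPats timestamp_columns with
    | some c => some c
    | none => PySem.List.pyGet? timestamp_columns 0

-- ===== PORT B =====

-- inner enumerate+break loop of B: index of the first pattern contained in c
def pvBPrio : List String → Nat → String → Option Nat
  | [], _, _ => none
  | p :: ps, i, c => if PySem.Str.isIn p c then some i else pvBPrio ps (i + 1) c

-- one step of B's single pass (parametrised by the pattern list)
def pvBStep (ps : List String) (acc : Option Nat × Option String) (c : String) :
    Option Nat × Option String :=
  match pvBPrio ps 0 c with
  | none => acc
  | some pr =>
    match acc.1 with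
    | none => (some pr, some c)
    | some bp => if pr < bp then (some pr, some c) else acc

def select_best_timestamp_column_py_alt (timestamp_columns : List String) : Option String :=
  if timestamp_columns = [] then
    none
  else
    match (timestamp_columns.foldl (pvBStep pvPats) (none, none)).2 with
    | some c => some c
    | none => PySem.List.pyGet? timestamp_columns 0

-- ===== PRECONDITION & SPEC =====
def Spec_select_best_timestamp_column_py (timestamp_columns : List String) (out : Option String) : Prop := out = select_best_timestamp_column_py_alt timestamp_columns
instance (timestamp_columns : List String) (out : Option String) : Decidable (Spec_select_best_timestamp_column_py timestamp_columns out) := by unfold Spec_select_best_timestamp_column_py; infer_instance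

-- ===== CLAIM (what is proved, stated in full; the proofs are below) =====
def Claim_equal_select_best_timestamp_column_py : Prop := ∀ (timestamp_columns : List String), Dom_select_best_timestamp_column_py timestamp_columns → Spec_select_best_timestamp_column_py timestamp_columns (select_best_timestamp_column_py timestamp_columns)

-- ===== LEMMAS AND PROOFS =====

-- shifting the running index of B's enumerate loop
theorem pvBPrio_shift (ps : List String) (i : Nat) (c : String) :
    pvBPrio ps i c = (pvBPrio ps 0 c).map (· + i) := by
  induction ps generalizing i with
  | nil => simp [pvBPrio]
  | cons p ps ih =>
    by_cases h : PySem.Chars.isIn p.toList c.toList = true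
    · simp [pvBPrio, h]
    · simp [pvBPrio, h, ih (i + 1), ih 1, Option.map_map]
      congr 1
      funext x
      omega

-- a state with best priority 0 absorbs all later columns
theorem pvBStep_absorb (ps : List String) (c : String) (cols : List String) :
    cols.foldl (pvBStep ps) (some 0, some c) = (some 0, some c) := by
  induction cols with
  | nil => rfl
  | cons d ds ih =>
    have : pvBStep ps (some 0, some c) d = (some 0, some c) := by
      unfold pvBStep
      cases pvBPrio ps 0 d <;> simp
    simp [List.foldl_cons, this, ih]

-- if no column contains p, the fold for (p :: ps) mirrors the fold for ps
theorem pvBStep_nomatch (p : String) (ps : List String) (cols : List String)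
    (h : ∀ c ∈ cols, PySem.Chars.isIn p.toList c.toList = false) (b : Option Nat) (s : Option String) :
    cols.foldl (pvBStep (p :: ps)) (b.map (· + 1), s)
      = (((cols.foldl (pvBStep ps) (b, s)).1).map (· + 1),
          (cols.foldl (pvBStep ps) (b, s)).2) := by
  induction cols generalizing b s with
  | nil => rfl
  | cons c cs ih =>
    have hc : PySem.Chars.isIn p.toList c.toList = false := h c (List.mem_cons_self ..)
    have hcs : ∀ d ∈ cs, PySem.Chars.isIn p.toList d.toList = false := fun d hd => h d (List.mem_cons_of_mem _ hd)
    have hpr : pvBPrio (p :: ps) 0 c = (pvBPrio ps 0 c).map (· + 1) := by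
      simp [pvBPrio, hc, pvBPrio_shift ps 1 c]
    simp only [List.foldl_cons]
    cases hp : pvBPrio ps 0 c with
    | none =>
      have h1 : pvBStep (p :: ps) (b.map (· + 1), s) c = (b.map (· + 1), s) := by
        unfold pvBStep; simp [hpr, hp]
      have h2 : pvBStep ps (b, s) c = (b, s) := by
        unfold pvBStep; simp [hp]
      rw [h1, h2, ih hcs]
    | some k =>
      cases b with
      | none =>
        have h1 : pvBStep (p :: ps) (Option.map (· + 1) none, s) c = ((some k).map (· + 1), some c) := by
          unfold pvBStep; simp [hpr, hp]
        have h2 : pvBStep ps (none, s) c = (some k, some c) := by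
          unfold pvBStep; simp [hp]
        rw [h1, h2, ih hcs]
      | some m =>
        by_cases hlt : k < m
        · have h1 : pvBStep (p :: ps) ((some m).map (· + 1), s) c = ((some k).map (· + 1), some c) := by
            unfold pvBStep; simp [hpr, hp, hlt]
          have h2 : pvBStep ps (some m, s) c = (some k, some c) := by
            unfold pvBStep; simp [hp, hlt]
          rw [h1, h2, ih hcs]
        · have h1 : pvBStep (p :: ps) ((some m).map (· + 1), s) c = ((some m).map (· + 1), s) := by
            unfold pvBStep; simp [hpr, hp]; omega
          have h2 : pvBStep ps (some m, s) c = (some m, s) := by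
            unfold pvBStep; simp [hp, hlt]
          rw [h1, h2, ih hcs]

-- if A's inner loop finds c, B's fold for (p :: ps) ends in (0, c)
theorem pvBStep_match (p : String) (ps : List String) (cols : List String) (c : String)
    (h : pvAInner p cols = some c) (b : Option Nat) (s : Option String) :
    cols.foldl (pvBStep (p :: ps)) (b.map (· + 1), s) = (some 0, some c) := by
  induction cols generalizing b s with
  | nil => simp [pvAInner] at h
  | cons d ds ih =>
    by_cases hd : PySem.Chars.isIn p.toList d.toList = true
    · have hc : d = c := by simpa [pvAInner, hd] using h
      subst hc
      have hpr : pvBPrio (p :: ps) 0 d = some 0 := by simp [pvBPrio, hd]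
      have h1 : pvBStep (p :: ps) (b.map (· + 1), s) d = (some 0, some d) := by
        unfold pvBStep
        cases b <;> simp [hpr]
      simp only [List.foldl_cons, h1, pvBStep_absorb]
    · have h' : pvAInner p ds = some c := by simpa [pvAInner, hd] using h
      have hpr : pvBPrio (p :: ps) 0 d = (pvBPrio ps 0 d).map (· + 1) := by
        simp [pvBPrio, hd, pvBPrio_shift ps 1 d]
      simp only [List.foldl_cons]
      cases hp : pvBPrio ps 0 d with
      | none =>
        have h1 : pvBStep (p :: ps) (b.map (· + 1), s) d = (b.map (· + 1), s) := by
          unfold pvBStep; simp [hpr, hp]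
        rw [h1, ih h' b s]
      | some k =>
        cases b with
        | none =>
          have h1 : pvBStep (p :: ps) (Option.map (· + 1) none, s) d = ((some k).map (· + 1), some d) := by
            unfold pvBStep; simp [hpr, hp]
          rw [h1, ih h' (some k) (some d)]
        | some m =>
          by_cases hlt : k < m
          · have h1 : pvBStep (p :: ps) ((some m).map (· + 1), s) d = ((some k).map (· + 1), some d) := by
              unfold pvBStep; simp [hpr, hp, hlt]
            rw [h1, ih h' (some k) (some d)]
          · have h1 : pvBStep (p :: ps) ((some m).map (· + 1), s) d = ((some m).map (· + 1), s) := by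
              unfold pvBStep; simp [hpr, hp]; omega
            rw [h1, ih h' (some m) s]

theorem pvAInner_none (p : String) (cols : List String)
    (h : pvAInner p cols = none) : ∀ c ∈ cols, PySem.Chars.isIn p.toList c.toList = false := by
  induction cols with
  | nil => simp
  | cons d ds ih =>
    by_cases hd : PySem.Chars.isIn p.toList d.toList = true
    · simp [pvAInner, hd] at h
    · have h' : pvAInner p ds = none := by simpa [pvAInner, hd] using h
      intro c hc
      rcases List.mem_cons.mp hc with rfl | hc
      · simpa using hd
      · exact ih h' c hc

-- the central lemma: B's fold result equals A's nested search, for any patterns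
theorem pvFold_eq_outer (ps : List String) (cols : List String) :
    (cols.foldl (pvBStep ps) (none, none)).2 = pvAOuter ps cols := by
  induction ps with
  | nil =>
    have : cols.foldl (pvBStep []) (none, none) = ((none : Option Nat), (none : Option String)) := by
      induction cols with
      | nil => rfl
      | cons c cs ih => simpa [List.foldl_cons, pvBStep, pvBPrio] using ih
    simp [this, pvAOuter]
  | cons p ps ih =>
    cases h : pvAInner p cols with
    | some c =>
      have := pvBStep_match p ps cols c h none none
      simp only [Option.map_none] at this
      simp [this, pvAOuter, h]
    | none =>
      have hall := pvAInner_none p cols h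
      have := pvBStep_nomatch p ps cols hall none none
      simp only [Option.map_none] at this
      simp [pvAOuter, h, this, ih]

-- ===== VERDICT (by name: the statement is the Claim_ definition above) =====
theorem select_best_timestamp_column_py_spec : Claim_equal_select_best_timestamp_column_py := by
  intro cols _
  unfold Spec_select_best_timestamp_column_py
  unfold select_best_timestamp_column_py select_best_timestamp_column_py_alt
  rw [pvFold_eq_outer]
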